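-- pv_equiv track=rewrite | github.com/OyvindTafjord/allennlp | allennlp/predictors/multiple_choice_qa.py | merge_wp_tokens
-- ===== SOURCE A (Python) =====
-- def merge_wp_tokens(tokens):
--     res = ""
--     for token in tokens:
--         if token.startswith("##"):
--             res += token[2:]
--         elif res == "":
--             res = token
--         else:
--             res += " " + token
--     return res
-- ===== SOURCE B (Python) =====
-- def merge_wp_tokens(tokens):
--     # Two-level scan: segment the token list into word groups (a group = one
--     # start token plus the maximal run of following '##' continuations), build
--     # each word by joining its stripped pieces, then space-join the words.
--     n = len(tokens)
--     parts = []
--     i = 0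
--     while i < n:
--         pieces = [tokens[i][2:] if tokens[i].startswith("##") else tokens[i]]
--         j = i + 1
--         while j < n and tokens[j].startswith("##"):
--             pieces.append(tokens[j][2:])
--             j += 1
--         parts.append("".join(pieces))
--         i = j
--     return " ".join(parts)
-- ===== Notes on version B (the rewrite author's own statement) =====
-- stated objective: alternative
-- what changed: B segments the token list into word groups with a nested scan (outer loop per word, inner loop consuming the run of '##' continuations), assembles each word by joining its stripped pieces and space-joins the words once, instead of A's flat single loop with a three-way spacing branch over a running string with the res == '' sentinel.
-- outside the precondition, e.g. on merge_wp_tokens(['', 'x']): A returns 'x', B returns ' x'; on merge_wp_tokens(['##', 'x']): A returns 'x', B returns ' x'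
import Mathlib
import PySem

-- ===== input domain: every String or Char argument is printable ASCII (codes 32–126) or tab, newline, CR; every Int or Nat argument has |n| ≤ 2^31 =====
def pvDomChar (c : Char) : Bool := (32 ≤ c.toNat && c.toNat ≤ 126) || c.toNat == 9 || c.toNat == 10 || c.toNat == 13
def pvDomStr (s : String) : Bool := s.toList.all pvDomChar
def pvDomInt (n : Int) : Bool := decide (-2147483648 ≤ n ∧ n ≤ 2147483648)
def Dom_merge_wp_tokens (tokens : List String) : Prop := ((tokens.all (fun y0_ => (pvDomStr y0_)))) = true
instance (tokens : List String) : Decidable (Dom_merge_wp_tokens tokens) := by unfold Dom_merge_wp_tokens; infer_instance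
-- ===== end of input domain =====

-- B segments the token list into word groups (nested scan consuming '##' runs)
-- and space-joins the assembled words, instead of A's flat three-way-branch loop
-- over a running string; objective: alternative decomposition, same cost.

-- ===== PORT A =====
-- res = ""; for token in tokens: if token.startswith("##"): res += token[2:]
-- elif res == "": res = token  else: res += " " + token   (on List Char, wrapped to String)
def mergeA_go (toks : List (List Char)) (res : List Char) : List Char :=
  match toks with
  | [] => res
  | t :: ts =>
    if PySem.Chars.startswith t ['#', '#'] then
      mergeA_go ts (res ++ PySem.List.slice t (some 2) none)
    else if res = [] then
      mergeA_go ts t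
    else
      mergeA_go ts (res ++ [' '] ++ t)

def merge_wp_tokens (tokens : List String) : String :=
  String.ofList (mergeA_go (tokens.map String.toList) [])

-- ===== PORT B =====
-- inner while loop: collect the run of '##' continuation pieces and the rest
def grabCont (ts : List (List Char)) : List (List Char) × List (List Char) :=
  match ts with
  | [] => ([], [])
  | t :: ts' =>
    if PySem.Chars.startswith t ['#', '#'] then
      let (ps, rest) := grabCont ts'
      (PySem.List.slice t (some 2) none :: ps, rest)
    else
      ([], t :: ts')

lemma grabCont_len (ts : List (List Char)) : (grabCont ts).2.length ≤ ts.length := by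
  induction ts with
  | nil => simp [grabCont]
  | cons t ts' ih =>
    simp only [grabCont]
    split
    · simpa using ih.trans (Nat.le_succ _)
    · simp

-- outer while loop: one word per iteration (pieces = stripped start + continuations,
-- word = "".join(pieces)), collected into `parts`
def mergeB_parts (toks : List (List Char)) : List (List Char) :=
  match toks with
  | [] => []
  | t :: ts =>
    PySem.Chars.join []
        ((if PySem.Chars.startswith t ['#', '#'] then PySem.List.slice t (some 2) none else t)
          :: (grabCont ts).1)
      :: mergeB_parts (grabCont ts).2
termination_by toks.length
decreasing_by exact Nat.lt_succ_of_le (grabCont_len ts)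

def merge_wp_tokens_alt (tokens : List String) : String :=
  String.ofList (PySem.Chars.join [' '] (mergeB_parts (tokens.map String.toList)))

-- ===== PRECONDITION & SPEC =====
-- Pre_ excludes lists whose FIRST token is "" or "##" (a wordpiece tokenizer never
-- emits an empty piece first): there A's ""-sentinel drops the leading empty word
-- while B keeps a separating space — both spacings are defensible on such input.
def Pre_merge_wp_tokens (tokens : List String) : Prop :=
  ∀ t ∈ tokens.take 1, t ≠ "" ∧ t ≠ "##"
instance (tokens : List String) : Decidable (Pre_merge_wp_tokens tokens) := by
  unfold Pre_merge_wp_tokens; infer_instance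

def pvWitness_merge_wp_tokens : List String := ["the", "##re", "##fore", "it", "works"]

def Spec_merge_wp_tokens (tokens : List String) (out : String) : Prop := out = merge_wp_tokens_alt tokens
instance (tokens : List String) (out : String) : Decidable (Spec_merge_wp_tokens tokens out) := by unfold Spec_merge_wp_tokens; infer_instance

-- ===== CLAIM (what is proved, stated in full; the proofs are below) =====
def Claim_equal_merge_wp_tokens : Prop := ∀ (tokens : List String), Dom_merge_wp_tokens tokens → Pre_merge_wp_tokens tokens → Spec_merge_wp_tokens tokens (merge_wp_tokens tokens)

-- ===== LEMMAS AND PROOFS =====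

lemma join_nilsep (ps : List (List Char)) : PySem.Chars.join [] ps = ps.flatten := by
  induction ps with
  | nil => simp [PySem.Chars.join_nil]
  | cons p ps ih =>
    cases ps with
    | nil => simp [PySem.Chars.join_singleton]
    | cons q qs => rw [PySem.Chars.join_cons_cons, ih]; simp

lemma join_space_cons (w : List Char) (l : List (List Char)) :
    PySem.Chars.join [' '] (w :: l)
      = w ++ (if l = [] then [] else ' ' :: PySem.Chars.join [' '] l) := by
  cases l with
  | nil => simp [PySem.Chars.join_singleton]
  | cons v vs => rw [PySem.Chars.join_cons_cons]; simp

lemma mergeB_parts_nil : mergeB_parts [] = [] := by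
  rw [mergeB_parts.eq_def]

lemma mergeB_parts_cons (t : List Char) (ts : List (List Char)) :
    mergeB_parts (t :: ts)
      = PySem.Chars.join []
          ((if PySem.Chars.startswith t ['#', '#'] then PySem.List.slice t (some 2) none else t)
            :: (grabCont ts).1)
        :: mergeB_parts (grabCont ts).2 := by
  rw [mergeB_parts.eq_def]

lemma mergeB_parts_nil_iff (toks : List (List Char)) :
    mergeB_parts toks = [] ↔ toks = [] := by
  cases toks with
  | nil => simp [mergeB_parts_nil]
  | cons t ts => rw [mergeB_parts_cons]; simp

-- main invariant: with a nonempty running string, A's loop appends the current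
-- word's continuation pieces and then a space-separated rendering of B's parts
lemma main_inv (n : ℕ) (toks : List (List Char)) (hn : toks.length ≤ n)
    (acc : List Char) (hacc : acc ≠ []) :
    mergeA_go toks acc =
      acc ++ (grabCont toks).1.flatten ++
        (if (grabCont toks).2 = [] then []
         else ' ' :: PySem.Chars.join [' '] (mergeB_parts (grabCont toks).2)) := by
  induction n generalizing toks acc with
  | zero =>
    have : toks = [] := List.length_eq_zero_iff.mp (Nat.le_zero.mp hn)
    subst this; simp [mergeA_go, grabCont]
  | succ n ih =>
    cases toks with
    | nil => simp [mergeA_go, grabCont]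
    | cons t ts =>
      by_cases h : PySem.Chars.startswith t ['#', '#'] = true
      · have hA : mergeA_go (t :: ts) acc
            = mergeA_go ts (acc ++ PySem.List.slice t (some 2) none) := by
          simp [mergeA_go, h]
        have hG : grabCont (t :: ts)
            = (PySem.List.slice t (some 2) none :: (grabCont ts).1, (grabCont ts).2) := by
          simp [grabCont, h]
        rw [hA, hG, ih ts (by simpa using Nat.le_of_succ_le_succ hn) _ (by simp [hacc])]
        simp
      · have h' : PySem.Chars.startswith t ['#', '#'] = false := by simpa using h
        have hA : mergeA_go (t :: ts) acc = mergeA_go ts (acc ++ [' '] ++ t) := by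
          simp [mergeA_go, h', hacc]
        have hG : grabCont (t :: ts) = ([], t :: ts) := by simp [grabCont, h']
        rw [hA, hG]
        have hrec := ih ts (by simpa using Nat.le_of_succ_le_succ hn) (acc ++ [' '] ++ t)
          (by simp)
        rw [hrec]
        have hB : mergeB_parts (t :: ts)
            = PySem.Chars.join [] (t :: (grabCont ts).1) :: mergeB_parts (grabCont ts).2 := by
          rw [mergeB_parts_cons]; simp [h']
        rw [if_neg (List.cons_ne_nil t ts), hB, join_space_cons, join_nilsep]
        simp [mergeB_parts_nil_iff, List.append_assoc]

lemma toList_ne_of_pre (s : String) (h : s ≠ "" ∧ s ≠ "##") :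
    s.toList ≠ [] ∧ s.toList ≠ ['#', '#'] := by
  constructor
  · intro hnil
    exact h.1 (by simpa using congrArg String.ofList hnil)
  · intro heq
    exact h.2 (by simpa using congrArg String.ofList heq)

lemma startswith_drop (t : List Char) (h : PySem.Chars.startswith t ['#', '#'] = true) :
    t = '#' :: '#' :: t.drop 2 := by
  rcases (PySem.Chars.startswith_iff t ['#', '#']).mp h with ⟨s, rfl⟩
  rfl

lemma slice_two (t : List Char) : PySem.List.slice t (some 2) none = t.drop 2 := by
  simpa using PySem.List.slice_from t (a := 2) (by norm_num)

-- ===== VERDICT (by name: the statement is the Claim_ definition above) =====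
theorem merge_wp_tokens_spec : Claim_equal_merge_wp_tokens := by
  intro tokens _ hpre
  unfold Spec_merge_wp_tokens merge_wp_tokens merge_wp_tokens_alt
  congr 1
  cases htk : tokens.map String.toList with
  | nil => simp [mergeA_go, mergeB_parts_nil, PySem.Chars.join_nil]
  | cons t ts =>
    cases tokens with
    | nil => simp at htk
    | cons s rest =>
      have hs := toList_ne_of_pre s (hpre s (by simp))
      rw [List.map_cons] at htk
      obtain ⟨rfl, rfl⟩ : s.toList = t ∧ rest.map String.toList = ts := by
        exact ⟨(List.cons.injEq _ _ _ _ ▸ htk).1, (List.cons.injEq _ _ _ _ ▸ htk).2⟩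
      by_cases h : PySem.Chars.startswith s.toList ['#', '#'] = true
      · have hdrop : PySem.List.slice s.toList (some 2) none ≠ [] := by
          rw [slice_two]
          intro hnil
          exact hs.2 (by rw [startswith_drop s.toList h, hnil])
        have hA : mergeA_go (s.toList :: rest.map String.toList) []
            = mergeA_go (rest.map String.toList) ([] ++ PySem.List.slice s.toList (some 2) none) := by
          simp [mergeA_go, h]
        have hB : mergeB_parts (s.toList :: rest.map String.toList)
            = PySem.Chars.join [] (PySem.List.slice s.toList (some 2) none
                :: (grabCont (rest.map String.toList)).1)
              :: mergeB_parts (grabCont (rest.map String.toList)).2 := by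
          rw [mergeB_parts_cons]; simp [h]
        rw [hA, main_inv (rest.map String.toList).length _ le_rfl _ (by simpa using hdrop),
          hB, join_space_cons, join_nilsep]
        simp [mergeB_parts_nil_iff, List.append_assoc]
      · have h' : PySem.Chars.startswith s.toList ['#', '#'] = false := by simpa using h
        have hA : mergeA_go (s.toList :: rest.map String.toList) []
            = mergeA_go (rest.map String.toList) s.toList := by
          simp [mergeA_go, h']
        have hB : mergeB_parts (s.toList :: rest.map String.toList)
            = PySem.Chars.join [] (s.toList :: (grabCont (rest.map String.toList)).1)
              :: mergeB_parts (grabCont (rest.map String.toList)).2 := by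
          rw [mergeB_parts_cons]; simp [h']
        rw [hA, main_inv (rest.map String.toList).length _ le_rfl _ hs.1,
          hB, join_space_cons, join_nilsep]
        simp [mergeB_parts_nil_iff, List.append_assoc]
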